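-- pv_equiv track=rewrite | github.com/surajpanker/Extract_data | name.py | extract_names
-- ===== SOURCE A (Python) =====
-- def extract_names(i):
--     file =i
--     index=0
--     c=0
--     for i in range(0, len(file)):
--         if file[i]=='_':
--             c=c+1
--         if c==2:
--             index=i
--             break
--
--
--     name =file[:index+1]
--     first=0
--     last=0
--     c1=0
--     for i in range(0, len(name)):
--         if name[i]=='_':
--             first=i
--             c1=c1+1
--             break
--         if c1==2:
--             last=i-1
--             break
--     ct=first+1
--     last=len(name)-1
--     s= name[ct:last]
--     f= name[0:first]
--     return f,s
-- ===== SOURCE B (Python) =====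
-- def extract_names(i):
--     parts = i.split('_')
--     if len(parts) >= 3:
--         return parts[0], parts[1]
--     return '', ''
-- ===== Notes on version B (the rewrite author's own statement) =====
-- stated objective: simpler
-- what changed: Replaces A's two early-breaking index scans with counters and slice arithmetic by a single split('_') followed by indexing the first two segments (with at least two underscores), else ('','').
import Mathlib
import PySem

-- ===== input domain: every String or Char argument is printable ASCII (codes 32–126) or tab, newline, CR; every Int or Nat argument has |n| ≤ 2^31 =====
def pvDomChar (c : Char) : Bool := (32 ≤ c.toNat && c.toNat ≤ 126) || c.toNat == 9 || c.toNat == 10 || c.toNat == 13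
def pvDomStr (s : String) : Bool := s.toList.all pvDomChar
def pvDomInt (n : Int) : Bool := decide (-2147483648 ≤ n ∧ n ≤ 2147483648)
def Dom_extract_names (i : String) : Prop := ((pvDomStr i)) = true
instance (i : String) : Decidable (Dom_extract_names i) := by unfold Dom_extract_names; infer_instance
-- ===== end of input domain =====

-- B replaces A's two early-breaking index scans and slice arithmetic by one split('_') plus
-- indexing the first two segments (objective: simpler).

-- ===== PORT A =====
-- first 'for i in range(0, len(file))' loop: args = remaining chars, i, index, c; returns index
def extract_names_loop1 : List Char → Int → Int → Int → Int
  | [], _, index, _ => index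
  | ch :: rest, i, index, c =>
    let c' := if ch = '_' then c + 1 else c
    if c' = 2 then i else extract_names_loop1 rest (i + 1) index c'

-- second 'for i in range(0, len(name))' loop: args = remaining chars, i, first, c1; returns first
-- (the loop's 'last = i-1' assignment is dead: 'last' is overwritten right after the loop)
def extract_names_loop2 : List Char → Int → Int → Int → Int
  | [], _, first, _ => first
  | ch :: rest, i, first, c1 =>
    if ch = '_' then i
    else if c1 = 2 then first
    else extract_names_loop2 rest (i + 1) first c1

def extract_names (i : String) : String × String :=
  let file := i.toList
  let index := extract_names_loop1 file 0 0 0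
  let name := PySem.List.slice file none (some (index + 1))
  let first := extract_names_loop2 name 0 0 0
  let ct := first + 1
  let last : Int := (name.length : Int) - 1
  let s := PySem.List.slice name (some ct) (some last)
  let f := PySem.List.slice name (some 0) (some first)
  (String.ofList f, String.ofList s)

-- ===== PORT B =====
def extract_names_alt (i : String) : String × String :=
  let parts := PySem.Chars.splitOn i.toList ['_']
  if 3 ≤ parts.length then (String.ofList parts[0]!, String.ofList parts[1]!) else ("", "")

-- ===== PRECONDITION & SPEC =====
def Spec_extract_names (i : String) (out : String × String) : Prop := out = extract_names_alt i
instance (i : String) (out : String × String) : Decidable (Spec_extract_names i out) := by unfold Spec_extract_names; infer_instance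

-- ===== CLAIM (what is proved, stated in full; the proofs are below) =====
def Claim_equal_extract_names : Prop := ∀ (i : String), Dom_extract_names i → Spec_extract_names i (extract_names i)

-- ===== LEMMAS AND PROOFS =====

-- A-side loop lemmas

theorem loop1_skip (a : List Char) (ha : '_' ∉ a) :
    ∀ (t : List Char) (i idx c : Int), c ≠ 2 →
    extract_names_loop1 (a ++ t) i idx c = extract_names_loop1 t (i + a.length) idx c := by
  induction a with
  | nil => intro t i idx c _; simp
  | cons x xs ih =>
    intro t i idx c hc
    have hx : x ≠ '_' := fun h => ha (h ▸ List.mem_cons_self)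
    have hxs : '_' ∉ xs := fun h => ha (List.mem_cons_of_mem _ h)
    simp only [List.cons_append, extract_names_loop1, if_neg hx, if_neg hc]
    rw [ih hxs t (i + 1) idx c hc]
    congr 1
    push_cast [List.length_cons]
    ring

theorem loop1_us (t : List Char) (i idx c : Int) :
    extract_names_loop1 ('_' :: t) i idx c
      = if c + 1 = 2 then i else extract_names_loop1 t (i + 1) idx (c + 1) := by
  simp [extract_names_loop1]

theorem loop1_low (l : List Char) :
    ∀ (i idx c : Int), c + (l.count '_' : Int) < 2 →
    extract_names_loop1 l i idx c = idx := by
  induction l with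
  | nil => intro i idx c _; rfl
  | cons x xs ih =>
    intro i idx c h
    by_cases hx : x = '_'
    · subst hx
      have hcnt : ('_' :: xs).count '_' = xs.count '_' + 1 := by simp
      rw [hcnt] at h
      rw [loop1_us, if_neg (by push_cast at h ⊢; omega)]
      exact ih _ _ _ (by push_cast at h ⊢; omega)
    · have hcnt : (x :: xs).count '_' = xs.count '_' := by simp [hx]
      rw [hcnt] at h
      simp only [extract_names_loop1, if_neg hx]
      rw [if_neg (by omega)]
      exact ih _ _ _ h

theorem loop2_skip (a : List Char) (ha : '_' ∉ a) :
    ∀ (t : List Char) (i first : Int),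
    extract_names_loop2 (a ++ t) i first 0 = extract_names_loop2 t (i + a.length) first 0 := by
  induction a with
  | nil => intro t i first; simp
  | cons x xs ih =>
    intro t i first
    have hx : x ≠ '_' := fun h => ha (h ▸ List.mem_cons_self)
    have hxs : '_' ∉ xs := fun h => ha (List.mem_cons_of_mem _ h)
    simp only [List.cons_append, extract_names_loop2, if_neg hx]
    rw [if_neg (by norm_num), ih hxs t (i + 1) first]
    congr 1
    push_cast [List.length_cons]
    ring

theorem loop2_us (t : List Char) (i first c1 : Int) :
    extract_names_loop2 ('_' :: t) i first c1 = i := by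
  simp [extract_names_loop2]

-- decomposition of a string with at least two underscores

theorem split_first (l : List Char) (h : '_' ∈ l) :
    ∃ a t, l = a ++ '_' :: t ∧ '_' ∉ a := by
  induction l with
  | nil => cases h
  | cons x xs ih =>
    by_cases hx : x = '_'
    · exact ⟨[], xs, by simp [hx], by simp⟩
    · have hmem : '_' ∈ xs := by
        rcases List.mem_cons.mp h with h' | h'
        · exact absurd h'.symm hx
        · exact h'
      rcases ih hmem with ⟨a, t, rfl, ha⟩
      exact ⟨x :: a, t, by simp, by simp [ha, Ne.symm hx]⟩

theorem decomp_two (l : List Char) (h : 2 ≤ l.count '_') :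
    ∃ a b rest, l = a ++ '_' :: (b ++ '_' :: rest) ∧ '_' ∉ a ∧ '_' ∉ b := by
  have h1 : '_' ∈ l := List.count_pos_iff.mp (by omega)
  rcases split_first l h1 with ⟨a, t, rfl, ha⟩
  have hca : a.count '_' = 0 := List.count_eq_zero.mpr ha
  have h2 : '_' ∈ t := by
    have hsum : List.count '_' (a ++ '_' :: t) = List.count '_' a + (List.count '_' t + 1) := by
      simp
    rw [hsum, hca] at h
    exact List.count_pos_iff.mp (by omega)
  rcases split_first t h2 with ⟨b, rest, rfl, hb⟩
  exact ⟨a, b, rest, rfl, ha, hb⟩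

-- B-side: step lemmas for PySem.Chars.splitOn.go (fueled; fuel is always large enough here)

theorem go_zero (l cur : List Char) (acc : List (List Char)) :
    PySem.Chars.splitOn.go ['_'] 0 l cur acc = ((cur.reverse ++ l) :: acc).reverse := by
  rw [PySem.Chars.splitOn.go.eq_def]

theorem go_succ_nil (f : Nat) (cur : List Char) (acc : List (List Char)) :
    PySem.Chars.splitOn.go ['_'] (f + 1) [] cur acc = (cur.reverse :: acc).reverse := by
  rw [PySem.Chars.splitOn.go.eq_def]

theorem go_step (f : Nat) (c : Char) (rest cur : List Char) (acc : List (List Char)) :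
    PySem.Chars.splitOn.go ['_'] (f + 1) (c :: rest) cur acc
      = if (['_'] : List Char).isPrefixOf (c :: rest) = true
        then PySem.Chars.splitOn.go ['_'] f (List.drop 1 (c :: rest)) [] (cur.reverse :: acc)
        else PySem.Chars.splitOn.go ['_'] f rest (c :: cur) acc := by
  rw [PySem.Chars.splitOn.go.eq_def]
  simp

theorem go_skip (a : List Char) (ha : '_' ∉ a) :
    ∀ (f : Nat) (t cur : List Char) (acc : List (List Char)),
    PySem.Chars.splitOn.go ['_'] (f + a.length) (a ++ t) cur acc
      = PySem.Chars.splitOn.go ['_'] f t (a.reverse ++ cur) acc := by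
  induction a with
  | nil => intro f t cur acc; simp
  | cons x xs ih =>
    intro f t cur acc
    have hx : x ≠ '_' := fun h => ha (h ▸ List.mem_cons_self)
    have hxs : '_' ∉ xs := fun h => ha (List.mem_cons_of_mem _ h)
    have hfuel : f + (x :: xs).length = (f + xs.length) + 1 := by simp; omega
    have hpre : (['_'] : List Char).isPrefixOf (x :: (xs ++ t)) = false := by
      simp [List.isPrefixOf, Ne.symm hx]
    rw [List.cons_append, hfuel, go_step, hpre]
    simp only [Bool.false_eq_true, if_false]
    rw [ih hxs f t (x :: cur) acc]
    congr 1
    simp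

theorem go_us (f : Nat) (t cur : List Char) (acc : List (List Char)) :
    PySem.Chars.splitOn.go ['_'] (f + 1) ('_' :: t) cur acc
      = PySem.Chars.splitOn.go ['_'] f t [] (cur.reverse :: acc) := by
  have hpre : (['_'] : List Char).isPrefixOf ('_' :: t) = true := by
    simp [List.isPrefixOf]
  rw [go_step, hpre]
  simp

theorem go_shape (fuel : Nat) :
    ∀ (l cur : List Char) (acc : List (List Char)), ∃ tl, tl ≠ [] ∧
    PySem.Chars.splitOn.go ['_'] fuel l cur acc = acc.reverse ++ tl := by
  induction fuel with
  | zero =>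
    intro l cur acc
    exact ⟨[cur.reverse ++ l], by simp, by rw [go_zero]; simp⟩
  | succ f ih =>
    intro l cur acc
    cases l with
    | nil => exact ⟨[cur.reverse], by simp, by rw [go_succ_nil]; simp⟩
    | cons c rest =>
      rw [go_step]
      by_cases hpre : (['_'] : List Char).isPrefixOf (c :: rest) = true
      · rw [if_pos hpre]
        rcases ih (List.drop 1 (c :: rest)) [] (cur.reverse :: acc) with ⟨tl, htl, heq⟩
        exact ⟨cur.reverse :: tl, by simp, by rw [heq]; simp⟩
      · rw [if_neg hpre]
        exact ih rest (c :: cur) acc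

theorem go_len (fuel : Nat) :
    ∀ (l cur : List Char) (acc : List (List Char)), l.length < fuel →
    (PySem.Chars.splitOn.go ['_'] fuel l cur acc).length = acc.length + l.count '_' + 1 := by
  induction fuel with
  | zero => intro l cur acc h; omega
  | succ f ih =>
    intro l cur acc h
    cases l with
    | nil => rw [go_succ_nil]; simp
    | cons c rest =>
      rw [go_step]
      by_cases hc : c = '_'
      · subst hc
        have hpre : (['_'] : List Char).isPrefixOf ('_' :: rest) = true := by
          simp [List.isPrefixOf]
        rw [if_pos hpre]
        simp only [List.drop_succ_cons, List.drop_zero]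
        rw [ih rest [] _ (by simp at h; omega)]
        simp
        omega
      · have hpre : (['_'] : List Char).isPrefixOf (c :: rest) = false := by
          simp [List.isPrefixOf, Ne.symm hc]
        rw [hpre]
        simp only [Bool.false_eq_true, if_false]
        rw [ih rest _ _ (by simp at h; omega)]
        simp [hc]

theorem splitOn_len (l : List Char) :
    (PySem.Chars.splitOn l ['_']).length = l.count '_' + 1 := by
  simp only [PySem.Chars.splitOn]
  rw [go_len (l.length + 1) l [] [] (by omega)]
  simp

theorem splitOn_two (a b rest : List Char) (ha : '_' ∉ a) (hb : '_' ∉ b) :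
    ∃ tl, tl ≠ [] ∧
    PySem.Chars.splitOn (a ++ '_' :: (b ++ '_' :: rest)) ['_'] = a :: b :: tl := by
  simp only [PySem.Chars.splitOn]
  have hfuel : (a ++ '_' :: (b ++ '_' :: rest)).length + 1
      = (b.length + rest.length + 3) + a.length := by simp; omega
  rw [hfuel, go_skip a ha]
  rw [show b.length + rest.length + 3 = (b.length + rest.length + 2) + 1 by omega, go_us]
  rw [show b.length + rest.length + 2 = (rest.length + 2) + b.length by omega, go_skip b hb]
  rw [show rest.length + 2 = (rest.length + 1) + 1 by omega, go_us]
  rcases go_shape (rest.length + 1) rest [] ((b.reverse ++ []).reverse :: (a.reverse ++ []).reverse :: []) with ⟨tl, htl, heq⟩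
  refine ⟨tl, htl, ?_⟩
  rw [heq]
  simp

-- the main equivalence, input pre-converted to its character list

theorem main_list (i : String) : extract_names i = extract_names_alt i := by
  simp only [extract_names, extract_names_alt]
  generalize i.toList = l
  by_cases h2 : 2 ≤ l.count '_'
  · -- at least two underscores: both sides return (first segment, second segment)
    rcases decomp_two l h2 with ⟨a, b, rest, rfl, ha, hb⟩
    -- A side
    have h1 : extract_names_loop1 (a ++ '_' :: (b ++ '_' :: rest)) 0 0 0
        = (a.length : Int) + 1 + b.length := by
      rw [loop1_skip a ha _ 0 0 0 (by norm_num)]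
      rw [loop1_us, if_neg (by norm_num)]
      rw [loop1_skip b hb _ _ _ _ (by norm_num)]
      rw [loop1_us, if_pos (by norm_num)]
      ring
    rw [h1]
    have hc1 : ((a.length : Int) + 1 + b.length + 1) = ((a.length + b.length + 2 : Nat) : Int) := by
      push_cast; ring
    rw [hc1, PySem.List.slice_to_natCast]
    have hname : (a ++ '_' :: (b ++ '_' :: rest)).take (a.length + b.length + 2)
        = a ++ '_' :: (b ++ ['_']) := by
      rw [show a ++ '_' :: (b ++ '_' :: rest) = (a ++ '_' :: (b ++ ['_'])) ++ rest by simp]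
      rw [List.take_left' (by simp; omega)]
    rw [hname]
    have h2' : extract_names_loop2 (a ++ '_' :: (b ++ ['_'])) 0 0 0 = (a.length : Int) := by
      rw [loop2_skip a ha _ 0 0, loop2_us]
      simp
    rw [h2']
    have hlen : ((a ++ '_' :: (b ++ ['_'])).length : Int) - 1
        = ((a.length + b.length + 1 : Nat) : Int) := by
      simp; ring
    rw [hlen]
    have hct : ((a.length : Int) + 1) = ((a.length + 1 : Nat) : Int) := by push_cast; ring
    rw [hct, PySem.List.slice_natCast]
    have hs : ((a ++ '_' :: (b ++ ['_'])).drop (a.length + 1)).take (a.length + b.length + 1 - (a.length + 1)) = b := by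
      rw [show a ++ '_' :: (b ++ ['_']) = (a ++ ['_']) ++ (b ++ ['_']) by simp]
      rw [List.drop_left' (by simp)]
      rw [show a.length + b.length + 1 - (a.length + 1) = b.length by omega]
      rw [List.take_left' rfl]
    rw [hs]
    have hf : PySem.List.slice (a ++ '_' :: (b ++ ['_'])) (some 0) (some (a.length : Int)) = a := by
      rw [PySem.List.slice_zero_start, PySem.List.slice_to_natCast]
      rw [show a ++ '_' :: (b ++ ['_']) = a ++ ('_' :: (b ++ ['_'])) from rfl]
      rw [List.take_left' rfl]
    rw [hf]
    -- B side
    rcases splitOn_two a b rest ha hb with ⟨tl, htl, hsplit⟩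
    rw [hsplit]
    rw [if_pos (by simp; have := List.length_pos_iff.mpr htl; omega)]
    simp
  · -- fewer than two underscores: both sides return ("", "")
    have hidx : extract_names_loop1 l 0 0 0 = 0 :=
      loop1_low l 0 0 0 (by omega)
    rw [hidx]
    rw [if_neg (by rw [splitOn_len]; omega)]
    rw [show ((0 : Int) + 1) = ((1 : Nat) : Int) by norm_num, PySem.List.slice_to_natCast]
    cases l with
    | nil => simp [extract_names_loop2, PySem.List.slice]
    | cons ch rest =>
      simp only [List.take_succ_cons, List.take_zero]
      have hl2 : extract_names_loop2 [ch] 0 0 0 = 0 := by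
        simp only [extract_names_loop2]
        split_ifs <;> rfl
      rw [hl2]
      have hs : PySem.List.slice [ch] (some (0 + 1)) (some (([ch].length : Int) - 1)) = [] := by
        rw [PySem.List.slice_toNat]
        · simp
        · norm_num
        · simp
      rw [hs]
      have hf : PySem.List.slice [ch] (some 0) (some 0) = [] := by
        rw [PySem.List.slice_toNat]
        · simp
        · norm_num
        · norm_num
      rw [hf]

-- ===== VERDICT (by name: the statement is the Claim_ definition above) =====
theorem extract_names_spec : Claim_equal_extract_names := by
  intro i _
  exact main_list i
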